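-- pv_equiv track=rewrite | github.com/mahiroaug/ssl_scanner | monitor/monitor.py | make_message9
-- ===== SOURCE A (Python) =====
-- def make_message9(list9):
--     header = "FROM-date, EXPIRY-date, `[残日数 ]`, `調査対象ドメイン   `, common-name        , signature-algorithm    , issuer      , スキャン日時\n"
--     format_str = "• {}, {}, `[{:3}days]`, `{:19}`, {:19}, {}, {}, {}\n"
--
--     msg_u30=""
--     filter_u30 = list(filter(lambda x: 14 <= x[8] <= 30, list9))
--     if filter_u30:
--         msg_u30 = "=========証明書失効まで30日切った人たちでーす========\n"
--         msg_u30 += header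
--         for tpl in filter_u30:
--             msg_u30 += format_str.format(tpl[5], tpl[6], tpl[8], tpl[1], tpl[2], tpl[4], tpl[3], tpl[7])
--         msg_u30 += ""
--
--     msg_u90=""
--     filter_u90 = list(filter(lambda x: 31 <= x[8] <= 90, list9))
--     if filter_u90:
--         msg_u90 = "=========証明書失効まで90日切った人たちでーす========\n"
--         msg_u90 += header
--         for tpl in filter_u90:
--             msg_u90 += format_str.format(tpl[5], tpl[6], tpl[8], tpl[1], tpl[2], tpl[4], tpl[3], tpl[7])
--         msg_u90 += ""
--
--     msg_o90=""
--     filter_o90 = list(filter(lambda x: 91 <= x[8], list9))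
--     if filter_o90:
--         msg_o90 = "=========残り91日以上あります========\n"
--         msg_o90 += header
--         for tpl in filter_o90:
--             msg_o90 += format_str.format(tpl[5], tpl[6], tpl[8], tpl[1], tpl[2], tpl[4], tpl[3], tpl[7])
--         msg_o90 += ""
--
--     return(msg_u30,msg_u90,msg_o90)
-- ===== SOURCE B (Python) =====
-- HEADER = "FROM-date, EXPIRY-date, `[残日数 ]`, `調査対象ドメイン   `, common-name        , signature-algorithm    , issuer      , スキャン日時\n"
-- FORMAT_STR = "• {}, {}, `[{:3}days]`, `{:19}`, {:19}, {}, {}, {}\n"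
--
-- def _row(t):
--     return FORMAT_STR.format(t[5], t[6], t[8], t[1], t[2], t[4], t[3], t[7])
--
-- def _msg(title, rows):
--     return title + HEADER + "".join(rows) if rows else ""
--
-- def make_message9(list9):
--     b30, b90, o90 = [], [], []
--     for t in list9:
--         d = t[8]
--         if 14 <= d <= 30:
--             b30.append(_row(t))
--         elif 31 <= d <= 90:
--             b90.append(_row(t))
--         elif 91 <= d:
--             o90.append(_row(t))
--     return (_msg("=========証明書失効まで30日切った人たちでーす========\n", b30),
--             _msg("=========証明書失効まで90日切った人たちでーす========\n", b90),
--             _msg("=========残り91日以上あります========\n", o90))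
-- ===== Notes on version B (the rewrite author's own statement) =====
-- stated objective: simpler
-- what changed: B replaces A's three separate filter-then-format passes over list9 with a single pass that dispatches each tuple into one of three row buckets by its day count, then assembles each message from its bucket.
import Mathlib
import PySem

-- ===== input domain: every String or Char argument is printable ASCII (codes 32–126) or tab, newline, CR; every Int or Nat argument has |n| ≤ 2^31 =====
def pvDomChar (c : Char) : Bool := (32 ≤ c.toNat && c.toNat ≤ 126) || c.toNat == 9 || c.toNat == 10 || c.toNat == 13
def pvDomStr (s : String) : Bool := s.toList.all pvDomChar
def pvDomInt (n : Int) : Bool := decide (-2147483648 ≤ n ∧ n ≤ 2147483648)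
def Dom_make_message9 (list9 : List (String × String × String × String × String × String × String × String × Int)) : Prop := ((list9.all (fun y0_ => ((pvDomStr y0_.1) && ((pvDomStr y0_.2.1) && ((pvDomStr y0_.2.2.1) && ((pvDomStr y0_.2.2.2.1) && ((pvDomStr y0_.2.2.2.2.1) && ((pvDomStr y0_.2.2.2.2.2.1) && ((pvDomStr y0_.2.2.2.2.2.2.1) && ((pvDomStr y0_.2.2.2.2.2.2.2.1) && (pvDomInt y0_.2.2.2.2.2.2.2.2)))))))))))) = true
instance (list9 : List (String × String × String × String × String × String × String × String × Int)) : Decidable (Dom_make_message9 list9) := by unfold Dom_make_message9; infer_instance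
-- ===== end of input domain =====

-- B does ONE pass over list9, dispatching each row into its bucket, instead of A's three
-- separate filter passes; objective: simpler/alternative decomposition (no speed claim).

-- ===== PORT A =====
-- shared formatting code: both Pythons use the identical header and format string
def pvHeader : String := "FROM-date, EXPIRY-date, `[残日数 ]`, `調査対象ドメイン   `, common-name        , signature-algorithm    , issuer      , スキャン日時\n"

-- Python '{:19}' (string, left-aligned, space-padded); exact: Python pads by character count
def pvPadR (w : Nat) (s : String) : String := s ++ String.ofList (List.replicate (w - (PySem.Str.len s).toNat) ' ')
-- Python '{:3}' applied to an int (right-aligned, space-padded); exact as above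
def pvPadL (w : Nat) (s : String) : String := String.ofList (List.replicate (w - (PySem.Str.len s).toNat) ' ') ++ s

-- format_str.format(tpl[5], tpl[6], tpl[8], tpl[1], tpl[2], tpl[4], tpl[3], tpl[7])
def pvRow (t : String × String × String × String × String × String × String × String × Int) : String :=
  "• " ++ t.2.2.2.2.2.1 ++ ", " ++ t.2.2.2.2.2.2.1 ++ ", `[" ++
    pvPadL 3 (PySem.Int.toStr t.2.2.2.2.2.2.2.2) ++ "days]`, `" ++ pvPadR 19 t.2.1 ++ "`, " ++
    pvPadR 19 t.2.2.1 ++ ", " ++ t.2.2.2.2.1 ++ ", " ++ t.2.2.2.1 ++ ", " ++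
    t.2.2.2.2.2.2.2.1 ++ "\n"

def make_message9 (list9 : List (String × String × String × String × String × String × String × String × Int)) : String × String × String :=
  let filter_u30 := list9.filter (fun x => decide (14 ≤ x.2.2.2.2.2.2.2.2 ∧ x.2.2.2.2.2.2.2.2 ≤ 30))
  let msg_u30 :=
    if filter_u30.isEmpty then ""
    else filter_u30.foldl (fun m tpl => m ++ pvRow tpl)
      ("=========証明書失効まで30日切った人たちでーす========\n" ++ pvHeader)
  let filter_u90 := list9.filter (fun x => decide (31 ≤ x.2.2.2.2.2.2.2.2 ∧ x.2.2.2.2.2.2.2.2 ≤ 90))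
  let msg_u90 :=
    if filter_u90.isEmpty then ""
    else filter_u90.foldl (fun m tpl => m ++ pvRow tpl)
      ("=========証明書失効まで90日切った人たちでーす========\n" ++ pvHeader)
  let filter_o90 := list9.filter (fun x => decide (91 ≤ x.2.2.2.2.2.2.2.2))
  let msg_o90 :=
    if filter_o90.isEmpty then ""
    else filter_o90.foldl (fun m tpl => m ++ pvRow tpl)
      ("=========残り91日以上あります========\n" ++ pvHeader)
  (msg_u30, msg_u90, msg_o90)

-- ===== PORT B =====
def pvMsg (title : String) (rows : List String) : String :=
  if rows.isEmpty then "" else title ++ pvHeader ++ PySem.Str.join "" rows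

def make_message9_alt (list9 : List (String × String × String × String × String × String × String × String × Int)) : String × String × String :=
  let bs := list9.foldl
    (fun (acc : List String × List String × List String) t =>
      let d := t.2.2.2.2.2.2.2.2
      if 14 ≤ d ∧ d ≤ 30 then (acc.1 ++ [pvRow t], acc.2.1, acc.2.2)
      else if 31 ≤ d ∧ d ≤ 90 then (acc.1, acc.2.1 ++ [pvRow t], acc.2.2)
      else if 91 ≤ d then (acc.1, acc.2.1, acc.2.2 ++ [pvRow t])
      else acc)
    ([], [], [])
  (pvMsg "=========証明書失効まで30日切った人たちでーす========\n" bs.1,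
   pvMsg "=========証明書失効まで90日切った人たちでーす========\n" bs.2.1,
   pvMsg "=========残り91日以上あります========\n" bs.2.2)

-- ===== PRECONDITION & SPEC =====
def Spec_make_message9 (list9 : List (String × String × String × String × String × String × String × String × Int)) (out : String × String × String) : Prop := out = make_message9_alt list9
instance (list9 : List (String × String × String × String × String × String × String × String × Int)) (out : String × String × String) : Decidable (Spec_make_message9 list9 out) := by unfold Spec_make_message9; infer_instance

-- ===== CLAIM (what is proved, stated in full; the proofs are below) =====
def Claim_equal_make_message9 : Prop := ∀ (list9 : List (String × String × String × String × String × String × String × String × Int)), Dom_make_message9 list9 → Spec_make_message9 list9 (make_message9 list9)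

-- ===== LEMMAS AND PROOFS =====

theorem pv_join_nil : PySem.Str.join "" ([] : List String) = "" := by
  simp [PySem.Str.join, PySem.Chars.join, List.intercalate]

theorem pv_join_cons (r : String) (rs : List String) :
    PySem.Str.join "" (r :: rs) = r ++ PySem.Str.join "" rs := by
  cases rs <;>
    simp [PySem.Str.join, PySem.Chars.join, List.intercalate, String.ofList_append, List.flatten]

-- A's '+='-loop over a bucket equals the initial string followed by the joined rows
theorem pv_foldl_join (l : List (String × String × String × String × String × String × String × String × Int))
    (init : String) :
    l.foldl (fun m tpl => m ++ pvRow tpl) init = init ++ PySem.Str.join "" (l.map pvRow) := by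
  induction l generalizing init with
  | nil => simp [pv_join_nil]
  | cons t l ih => simp [List.foldl, ih, pv_join_cons, String.append_assoc]

-- B's single dispatch pass computes exactly the three filtered-and-formatted row lists
theorem pv_buckets (l : List (String × String × String × String × String × String × String × String × Int))
    (a b c : List String) :
    l.foldl
      (fun (acc : List String × List String × List String) t =>
        let d := t.2.2.2.2.2.2.2.2
        if 14 ≤ d ∧ d ≤ 30 then (acc.1 ++ [pvRow t], acc.2.1, acc.2.2)
        else if 31 ≤ d ∧ d ≤ 90 then (acc.1, acc.2.1 ++ [pvRow t], acc.2.2)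
        else if 91 ≤ d then (acc.1, acc.2.1, acc.2.2 ++ [pvRow t])
        else acc)
      (a, b, c) =
    (a ++ (l.filter (fun x => decide (14 ≤ x.2.2.2.2.2.2.2.2 ∧ x.2.2.2.2.2.2.2.2 ≤ 30))).map pvRow,
     b ++ (l.filter (fun x => decide (31 ≤ x.2.2.2.2.2.2.2.2 ∧ x.2.2.2.2.2.2.2.2 ≤ 90))).map pvRow,
     c ++ (l.filter (fun x => decide (91 ≤ x.2.2.2.2.2.2.2.2))).map pvRow) := by
  induction l generalizing a b c with
  | nil => simp
  | cons t l ih =>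
    simp only [List.foldl_cons, List.filter_cons, decide_eq_true_eq]
    by_cases h1 : 14 ≤ t.2.2.2.2.2.2.2.2 ∧ t.2.2.2.2.2.2.2.2 ≤ 30
    · rw [if_pos h1, if_pos h1,
        if_neg (show ¬(31 ≤ t.2.2.2.2.2.2.2.2 ∧ t.2.2.2.2.2.2.2.2 ≤ 90) by omega),
        if_neg (show ¬(91 ≤ t.2.2.2.2.2.2.2.2) by omega), ih]
      simp
    · rw [if_neg h1, if_neg h1]
      by_cases h2 : 31 ≤ t.2.2.2.2.2.2.2.2 ∧ t.2.2.2.2.2.2.2.2 ≤ 90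
      · rw [if_pos h2, if_pos h2,
          if_neg (show ¬(91 ≤ t.2.2.2.2.2.2.2.2) by omega), ih]
        simp
      · rw [if_neg h2, if_neg h2]
        by_cases h3 : 91 ≤ t.2.2.2.2.2.2.2.2
        · rw [if_pos h3, if_pos h3, ih]
          simp
        · rw [if_neg h3, if_neg h3, ih]

theorem pv_msg_eq (title : String)
    (fl : List (String × String × String × String × String × String × String × String × Int)) :
    pvMsg title (fl.map pvRow) =
      (if fl.isEmpty then ""
       else fl.foldl (fun m tpl => m ++ pvRow tpl) (title ++ pvHeader)) := by
  cases fl with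
  | nil => simp [pvMsg]
  | cons t l => simp [pvMsg, pv_foldl_join, pv_join_cons, String.append_assoc]

-- ===== VERDICT (by name: the statement is the Claim_ definition above) =====
theorem make_message9_spec : Claim_equal_make_message9 := by
  intro list9 _
  unfold Spec_make_message9 make_message9 make_message9_alt
  simp only [pv_buckets, List.nil_append, pv_msg_eq]
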